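-- pv_equiv track=rewrite | github.com/KINOX0924/Programmers_codingtest | 프로그래머스/0/181926. 수 조작하기 1/수 조작하기 1.py | solution
-- ===== SOURCE A (Python) =====
-- def solution(n, control):
--     answer = 0
--
--     for key in control :
--         if key == "w" :
--             n += 1
--         elif key == "s" :
--             n -= 1
--         elif key == "d" :
--             n += 10
--         else :
--             n -= 10
--     answer = n
--
--     return answer
-- ===== SOURCE B (Python) =====
-- def solution(n, control):
--     cw = control.count("w")
--     cs = control.count("s")
--     cd = control.count("d")
--     ca = len(control) - cw - cs - cd
--     return n + cw - cs + 10 * cd - 10 * ca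
-- ===== Notes on version B (the rewrite author's own statement) =====
-- stated objective: faster
-- what changed: Replaces the per-character Python branching loop with a closed form over character counts (n + #w - #s + 10*#d - 10*(len - #w - #s - #d)) using str.count.
import Mathlib
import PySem

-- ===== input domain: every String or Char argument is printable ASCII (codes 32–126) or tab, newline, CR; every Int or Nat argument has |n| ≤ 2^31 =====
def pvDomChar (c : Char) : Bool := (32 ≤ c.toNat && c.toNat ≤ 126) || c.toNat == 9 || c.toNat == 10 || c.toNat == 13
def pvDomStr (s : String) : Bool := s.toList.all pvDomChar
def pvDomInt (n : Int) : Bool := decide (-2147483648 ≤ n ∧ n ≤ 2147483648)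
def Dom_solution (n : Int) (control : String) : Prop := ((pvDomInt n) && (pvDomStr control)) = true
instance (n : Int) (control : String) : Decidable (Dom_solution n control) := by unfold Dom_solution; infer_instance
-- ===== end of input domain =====

-- B computes the answer in closed form from character counts instead of A's per-character branching loop (objective: simpler).


-- ===== PORT A =====
-- 'for key in control' updating n; branches in the same order as the Python.
def solution (n : Int) (control : String) : Int :=
  let n := control.toList.foldl
    (fun n key =>
      if key = 'w' then n + 1
      else if key = 's' then n - 1
      else if key = 'd' then n + 10
      else n - 10) n
  let answer := n
  answer

-- ===== PORT B =====
-- control.count('c') for a single character is exactly the character count of the list of chars.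
def solution_alt (n : Int) (control : String) : Int :=
  let cw : Int := control.toList.count 'w'
  let cs : Int := control.toList.count 's'
  let cd : Int := control.toList.count 'd'
  let ca : Int := (control.toList.length : Int) - cw - cs - cd
  n + cw - cs + 10 * cd - 10 * ca

-- ===== PRECONDITION & SPEC =====
def Spec_solution (n : Int) (control : String) (out : Int) : Prop := out = solution_alt n control
instance (n : Int) (control : String) (out : Int) : Decidable (Spec_solution n control out) := by unfold Spec_solution; infer_instance

-- ===== CLAIM =====
def Claim_equal_solution : Prop := ∀ (n : Int) (control : String), Dom_solution n control → Spec_solution n control (solution n control)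

-- ===== LEMMAS AND PROOFS =====
theorem solution_foldl_closed (l : List Char) (n : Int) :
    l.foldl (fun n key =>
      if key = 'w' then n + 1
      else if key = 's' then n - 1
      else if key = 'd' then n + 10
      else n - 10) n
    = n + (l.count 'w' : Int) - (l.count 's' : Int) + 10 * (l.count 'd' : Int)
        - 10 * ((l.length : Int) - (l.count 'w' : Int) - (l.count 's' : Int) - (l.count 'd' : Int)) := by
  induction l generalizing n with
  | nil => simp
  | cons c t ih =>
    simp only [List.foldl_cons, List.count_cons, List.length_cons, ih]
    by_cases hw : c = 'w' <;> by_cases hs : c = 's' <;> by_cases hd : c = 'd' <;>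
      simp_all <;> ring

-- ===== VERDICT =====
theorem solution_spec : Claim_equal_solution := by
  intro n control _
  show solution n control = solution_alt n control
  simp only [solution, solution_alt, solution_foldl_closed]
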